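-- pv_equiv track=rewrite | github.com/happykhan/alleleatlas | alleleatlas/cluster/collapse_profiles.py | _collapse_samples
-- ===== SOURCE A (Python) =====
-- from collections import defaultdict
--
-- def _collapse_samples(mst_edges, n_samples, threshold):
--     """
--     Collapse samples where MST edge < threshold.
--
--     Returns:
--         clusters: list of lists, each containing original sample indices
--         cluster_map: dict mapping original sample index to cluster ID
--     """
--     parent = list(range(n_samples))
--
--     def find(x):
--         while parent[x] != x:
--             parent[x] = parent[parent[x]]
--             x = parent[x]
--         return x
--
--     def union(a, b):
--         ra, rb = find(a), find(b)
--         if ra != rb: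
--             parent[rb] = ra
--
--     # Collapse edges below threshold
--     for u, v, w in mst_edges:
--         if w < threshold:
--             union(u, v)
--
--     # Group samples by cluster
--     clusters_dict = defaultdict(list)
--     for i in range(n_samples):
--         root = find(i)
--         clusters_dict[root].append(i)
--
--     # Convert to list format and create mapping
--     clusters = list(clusters_dict.values())
--     cluster_map = {}
--     for cluster_id, sample_indices in enumerate(clusters):
--         for sample_idx in sample_indices:
--             cluster_map[sample_idx] = cluster_id
--
--     return clusters, cluster_map
-- ===== SOURCE B (Python) =====
-- def _collapse_samples(mst_edges, n_samples, threshold):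
--     """Label propagation instead of union-find: comp[i] is i's current
--     component label; each sub-threshold edge merges two labels by a
--     relabelling pass, then one enumerate pass groups the samples."""
--     comp = list(range(n_samples))
--     for u, v, w in mst_edges:
--         if w < threshold:
--             a, b = comp[u], comp[v]
--             if a != b:
--                 comp = [a if c == b else c for c in comp]
--     clusters = []
--     index_of = {}
--     for i, r in enumerate(comp):
--         if r in index_of:
--             clusters[index_of[r]].append(i)
--         else:
--             index_of[r] = len(clusters)
--             clusters.append([i])
--     cluster_map = {s: cid for cid, cl in enumerate(clusters) for s in cl}
--     return clusters, cluster_map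
-- ===== Notes on version B (the rewrite author's own statement) =====
-- stated objective: simpler
-- what changed: Replaces the union-find (path-halving find + union on a parent array, then a defaultdict grouping pass plus an enumerate pass) by direct label propagation: comp[i] holds i's component label, each sub-threshold edge merges two labels with one relabelling pass, and a single enumerate pass groups samples and assigns cluster ids.
import Mathlib
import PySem

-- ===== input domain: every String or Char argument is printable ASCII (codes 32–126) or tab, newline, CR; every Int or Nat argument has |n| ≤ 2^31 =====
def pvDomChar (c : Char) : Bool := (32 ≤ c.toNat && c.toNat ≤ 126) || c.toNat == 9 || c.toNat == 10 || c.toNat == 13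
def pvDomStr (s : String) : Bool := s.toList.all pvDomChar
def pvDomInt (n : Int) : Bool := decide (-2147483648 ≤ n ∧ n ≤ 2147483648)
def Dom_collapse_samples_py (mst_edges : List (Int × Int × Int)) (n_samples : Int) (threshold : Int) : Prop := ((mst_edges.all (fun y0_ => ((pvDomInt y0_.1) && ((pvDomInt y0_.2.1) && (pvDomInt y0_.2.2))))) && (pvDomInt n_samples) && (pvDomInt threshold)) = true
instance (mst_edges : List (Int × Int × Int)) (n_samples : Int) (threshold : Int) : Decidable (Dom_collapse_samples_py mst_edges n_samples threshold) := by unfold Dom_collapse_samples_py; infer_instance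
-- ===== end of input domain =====

-- B replaces A's union-find by direct label propagation (one relabelling pass per
-- merging edge, one enumerate pass to group); objective: simpler, not faster.

-- ===== PORT A =====
-- parent[x] = v ; exact for -len ≤ x < len (the only indices reached: the matching read succeeded)
def pySetAt (p : List Int) (x v : Int) : List Int :=
  if 0 ≤ x then p.set x.toNat v else p.set (x + p.length).toNat v

-- the body of A's `find`: while parent[x] != x: parent[x] = parent[parent[x]]; x = parent[x]
-- (fuel p.length + 1 is enough: under Pre_ the parent chain reaches its root in ≤ p.length steps)
def findAux : List Int → Int → Nat → List Int × Int
  | p, x, 0 => (p, x)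
  | p, x, f + 1 =>
    match PySem.List.pyGet? p x with
    | none => (p, x)        -- IndexError; outside Pre_
    | some px =>
      if px = x then (p, x)
      else
        match PySem.List.pyGet? p px with
        | none => (p, x)    -- IndexError; outside Pre_
        | some ppx => findAux (pySetAt p x ppx) ppx f

def findA (p : List Int) (x : Int) : List Int × Int := findAux p x (p.length + 1)

-- union(a, b): ra, rb = find(a), find(b); if ra != rb: parent[rb] = ra
def unionA (p : List Int) (a b : Int) : List Int :=
  let r1 := findA p a
  let r2 := findA r1.1 b
  if r1.2 ≠ r2.2 then pySetAt r2.1 r2.2 r1.2 else r2.1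

def collapse_samples_py (mst_edges : List (Int × Int × Int)) (n_samples : Int) (threshold : Int) : List (List Int) × (List (Int × Int)) :=
  let parent : List Int := PySem.List.pyRange 0 n_samples 1
  let p1 := mst_edges.foldl (fun p e => if e.2.2 < threshold then unionA p e.1 e.2.1 else p) parent
  -- clusters_dict = defaultdict(list); for i in range(n_samples): clusters_dict[find(i)].append(i)
  let st := (PySem.List.pyRange 0 n_samples 1).foldl
      (fun (s : List Int × PySem.Dict Int (List Int)) i =>
        let fr := findA s.1 i
        (fr.1, s.2.modify fr.2 [] (fun l => l ++ [i])))
      (p1, PySem.Dict.empty)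
  let clusters := st.2.values
  let cmap := (PySem.List.enumerate clusters 0).foldl
      (fun (m : PySem.Dict Int Int) ci => ci.2.foldl (fun m s => m.insert s ci.1) m)
      PySem.Dict.empty
  (clusters, cmap.items)

-- ===== PORT B =====
def collapse_samples_py_alt (mst_edges : List (Int × Int × Int)) (n_samples : Int) (threshold : Int) : List (List Int) × (List (Int × Int)) :=
  let comp0 : List Int := PySem.List.pyRange 0 n_samples 1
  let comp := mst_edges.foldl
      (fun comp e =>
        if e.2.2 < threshold then
          match PySem.List.pyGet? comp e.1, PySem.List.pyGet? comp e.2.1 with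
          | some a, some b =>
            if a ≠ b then comp.map (fun c => if c = b then a else c) else comp
          | _, _ => comp   -- IndexError; outside Pre_
        else comp)
      comp0
  let st := (PySem.List.enumerate comp 0).foldl
      (fun (s : List (List Int) × PySem.Dict Int Int) ir =>
        match s.2.get? ir.2 with
        | some j => (s.1.modify j.toNat (fun l => l ++ [ir.1]), s.2)
        | none => (s.1 ++ [[ir.1]], s.2.insert ir.2 (s.1.length : Int)))
      ([], PySem.Dict.empty)
  let clusters := st.1
  let cmap := (PySem.List.enumerate clusters 0).foldl
      (fun (m : PySem.Dict Int Int) ci => ci.2.foldl (fun m s => m.insert s ci.1) m)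
      PySem.Dict.empty
  (clusters, cmap.items)

-- ===== PRECONDITION & SPEC =====
-- Pre_ excludes exactly the inputs on which A raises IndexError: a sub-threshold edge
-- whose endpoint is outside Python's indexable range [-n_samples, n_samples) of the parent list.
def Pre_collapse_samples_py (mst_edges : List (Int × Int × Int)) (n_samples : Int) (threshold : Int) : Prop :=
  ∀ e ∈ mst_edges, e.2.2 < threshold →
    (-n_samples ≤ e.1 ∧ e.1 < n_samples ∧ -n_samples ≤ e.2.1 ∧ e.2.1 < n_samples)
instance (mst_edges : List (Int × Int × Int)) (n_samples : Int) (threshold : Int) : Decidable (Pre_collapse_samples_py mst_edges n_samples threshold) := by unfold Pre_collapse_samples_py; infer_instance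

def pvWitness_collapse_samples_py : (List (Int × Int × Int)) × Int × Int := ([(0, 1, 0), (1, 2, 5), (0, 3, 9)], 4, 3)

def Spec_collapse_samples_py (mst_edges : List (Int × Int × Int)) (n_samples : Int) (threshold : Int) (out : List (List Int) × (List (Int × Int))) : Prop := out = collapse_samples_py_alt mst_edges n_samples threshold
instance (mst_edges : List (Int × Int × Int)) (n_samples : Int) (threshold : Int) (out : List (List Int) × (List (Int × Int))) : Decidable (Spec_collapse_samples_py mst_edges n_samples threshold out) := by unfold Spec_collapse_samples_py; infer_instance

-- ===== CLAIM (what is proved, stated in full; the proofs are below) =====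
def Claim_equal_collapse_samples_py : Prop := ∀ (mst_edges : List (Int × Int × Int)) (n_samples : Int) (threshold : Int), Dom_collapse_samples_py mst_edges n_samples threshold → Pre_collapse_samples_py mst_edges n_samples threshold → Spec_collapse_samples_py mst_edges n_samples threshold (collapse_samples_py mst_edges n_samples threshold)

-- ===== LEMMAS AND PROOFS =====

-- parent application, iteration, roots -------------------------------------------------
def pvApp (p : List Int) (x : Int) : Int := p.getD x.toNat 0

def pvIt (p : List Int) : Nat → Int → Int
  | 0, x => x
  | k + 1, x => pvApp p (pvIt p k x)

def pvRoot (p : List Int) (x r : Int) : Prop := (∃ k, pvIt p k x = r) ∧ pvApp p r = r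

def pvRange (p : List Int) : Prop :=
  ∀ x : Int, 0 ≤ x → x < (p.length : Int) → 0 ≤ pvApp p x ∧ pvApp p x < (p.length : Int)

def pvAcyc (p : List Int) : Prop :=
  ∀ x : Int, 0 ≤ x → x < (p.length : Int) → ∀ k : Nat, k ≠ 0 → pvIt p k x = x → pvApp p x = x

theorem pvIt_succ_left (p : List Int) (k : Nat) (x : Int) :
    pvIt p (k + 1) x = pvIt p k (pvApp p x) := by
  induction k with
  | zero => rfl
  | succ k ih => rw [pvIt, ih, pvIt]

theorem pvIt_fix (p : List Int) (r : Int) (h : pvApp p r = r) : ∀ k, pvIt p k r = r := by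
  intro k; induction k with
  | zero => rfl
  | succ k ih => rw [pvIt, ih, h]

theorem pvIt_add (p : List Int) (m k : Nat) (x : Int) :
    pvIt p (m + k) x = pvIt p m (pvIt p k x) := by
  induction m with
  | zero => simp [pvIt]
  | succ m ih => rw [Nat.succ_add, pvIt, ih, pvIt]

theorem pvApp_nonneg (p : List Int) (h : pvRange p) (x : Int) (hx : 0 ≤ x) : 0 ≤ pvApp p x := by
  rcases lt_or_ge x (p.length : Int) with h1 | h1
  · exact (h x hx h1).1
  · unfold pvApp
    rw [List.getD_eq_getElem?_getD, List.getElem?_eq_none (by omega)]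
    simp

theorem pvIt_nonneg (p : List Int) (h : pvRange p) (x : Int) (hx : 0 ≤ x) :
    ∀ k, 0 ≤ pvIt p k x := by
  intro k; induction k with
  | zero => exact hx
  | succ k ih => exact pvApp_nonneg p h _ ih

theorem pvIt_range (p : List Int) (h : pvRange p) (x : Int) (hx0 : 0 ≤ x) (hx1 : x < (p.length : Int)) :
    ∀ k, 0 ≤ pvIt p k x ∧ pvIt p k x < (p.length : Int) := by
  intro k; induction k with
  | zero => exact ⟨hx0, hx1⟩
  | succ k ih => exact h _ ih.1 ih.2

theorem pvRoot_unique (p : List Int) (x r r' : Int) (h1 : pvRoot p x r) (h2 : pvRoot p x r') : r = r' := by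
  obtain ⟨⟨k, hk⟩, hf⟩ := h1
  obtain ⟨⟨k', hk'⟩, hf'⟩ := h2
  rcases Nat.le_total k k' with h | h
  · have : pvIt p (k' - k + k) x = r' := by rw [Nat.sub_add_cancel h]; exact hk'
    rw [pvIt_add, hk, pvIt_fix p r hf] at this
    exact this
  · have : pvIt p (k - k' + k') x = r := by rw [Nat.sub_add_cancel h]; exact hk
    rw [pvIt_add, hk', pvIt_fix p r' hf'] at this
    exact this.symm

-- existence of a short path to a root (pigeonhole) -------------------------------------
theorem pvExists_reach (p : List Int) (hR : pvRange p) (hA : pvAcyc p) (x : Int)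
    (hx0 : 0 ≤ x) (hx1 : x < (p.length : Int)) :
    ∃ r k, k < p.length ∧ pvIt p k x = r ∧ pvApp p r = r := by
  have hlen : 0 < p.length := by omega
  -- pigeonhole: the p.length + 1 iterates pvIt p 0 x, …, pvIt p p.length x cannot all be distinct
  have ⟨i, j, hne, hij⟩ : ∃ i j : Fin (p.length + 1), i ≠ j ∧
      (⟨(pvIt p i x).toNat, by have := (pvIt_range p hR x hx0 hx1 i).2; omega⟩ : Fin p.length) =
      (⟨(pvIt p j x).toNat, by have := (pvIt_range p hR x hx0 hx1 j).2; omega⟩ : Fin p.length) := by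
    have := Fintype.exists_ne_map_eq_of_card_lt
      (fun i : Fin (p.length + 1) =>
        (⟨(pvIt p i x).toNat, by have := (pvIt_range p hR x hx0 hx1 i).2; omega⟩ : Fin p.length))
      (by simp)
    exact this
  have heq : pvIt p (i : Nat) x = pvIt p (j : Nat) x := by
    have h1 := (pvIt_range p hR x hx0 hx1 i).1
    have h2 := (pvIt_range p hR x hx0 hx1 j).1
    have := congrArg Fin.val hij
    simp at this
    omega
  -- wlog i < j
  rcases Nat.lt_or_ge (i : Nat) (j : Nat) with hlt | hge
  · refine ⟨pvIt p (i : Nat) x, (i : Nat), by omega, rfl, ?_⟩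
    have hc : pvIt p ((j : Nat) - (i : Nat)) (pvIt p (i : Nat) x) = pvIt p (i : Nat) x := by
      rw [← pvIt_add, Nat.sub_add_cancel (by omega), ← heq]
    exact hA _ (pvIt_range p hR x hx0 hx1 _).1 (pvIt_range p hR x hx0 hx1 _).2 _ (by omega) hc
  · have hlt : (j : Nat) < (i : Nat) := by
      rcases Nat.lt_or_ge (j : Nat) (i : Nat) with h | h
      · exact h
      · exact absurd (Fin.ext (by omega)) hne
    refine ⟨pvIt p (j : Nat) x, (j : Nat), by omega, rfl, ?_⟩
    have hc : pvIt p ((i : Nat) - (j : Nat)) (pvIt p (j : Nat) x) = pvIt p (j : Nat) x := by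
      rw [← pvIt_add, Nat.sub_add_cancel (by omega), heq]
    exact hA _ (pvIt_range p hR x hx0 hx1 _).1 (pvIt_range p hR x hx0 hx1 _).2 _ (by omega) hc

-- the halving step p' = p.set x (p[p[x]]) ----------------------------------------------
theorem pvApp_set (p : List Int) (x v y : Int) (hx0 : 0 ≤ x) (hx1 : x < (p.length : Int)) (hy : 0 ≤ y) :
    pvApp (p.set x.toNat v) y = if y = x then v else pvApp p y := by
  unfold pvApp
  rw [List.getD_eq_getElem?_getD, List.getD_eq_getElem?_getD, List.getElem?_set]
  by_cases h : y = x
  · subst h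
    simp [(by omega : y.toNat < p.length)]
  · rw [if_neg (by omega), if_neg h]


theorem pvHalf_fix (p : List Int) (x : Int) (hx0 : 0 ≤ x) (hx1 : x < (p.length : Int))
    (r : Int) (hr0 : 0 ≤ r) (h : pvApp p r = r) :
    pvApp (p.set x.toNat (pvApp p (pvApp p x))) r = r := by
  rw [pvApp_set p x _ r hx0 hx1 hr0]
  by_cases hrx : r = x
  · subst hrx
    rw [if_pos rfl, h, h]
  · rw [if_neg hrx, h]

theorem pvHalf_path (p : List Int) (x : Int) (hR : pvRange p) (hx0 : 0 ≤ x) (hx1 : x < (p.length : Int)) :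
    ∀ k y r, 0 ≤ y → pvIt p k y = r → pvApp p r = r →
      ∃ m ≤ k, pvIt (p.set x.toNat (pvApp p (pvApp p x))) m y = r := by
  intro k
  induction k using Nat.strong_induction_on with
  | _ k ih =>
    intro y r hy hit hfix
    match k with
    | 0 => exact ⟨0, le_refl 0, hit⟩
    | k + 1 =>
      by_cases hyx : y = x
      · subst hyx
        by_cases hfx : pvApp p y = y
        · rw [pvIt_fix p y hfx] at hit
          exact ⟨0, by omega, hit⟩
        · match k with
          | 0 =>
            -- one step: r = p[y], a fixpoint; p'[y] = p[p[y]] = p[r] = r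
            refine ⟨1, le_refl 1, ?_⟩
            simp only [pvIt] at hit ⊢
            rw [pvApp_set p y _ y hx0 hx1 hy, if_pos rfl, hit, hfix]
          | k + 1 =>
            -- two steps forward in p, then the inductive hypothesis
            have hit2 : pvIt p k (pvApp p (pvApp p y)) = r := by
              rw [pvIt_succ_left, pvIt_succ_left] at hit
              exact hit
            have hnn : 0 ≤ pvApp p (pvApp p y) :=
              pvApp_nonneg p hR _ (pvApp_nonneg p hR y hy)
            obtain ⟨m, hm, hres⟩ := ih k (by omega) _ r hnn hit2 hfix
            refine ⟨m + 1, by omega, ?_⟩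
            rw [pvIt_succ_left, pvApp_set p y _ y hx0 hx1 hy, if_pos rfl]
            exact hres
      · have hit' : pvIt p k (pvApp p y) = r := by
          rw [pvIt_succ_left] at hit
          exact hit
        obtain ⟨m, hm, hres⟩ := ih k (by omega) _ r (pvApp_nonneg p hR y hy) hit' hfix
        refine ⟨m + 1, by omega, ?_⟩
        rw [pvIt_succ_left, pvApp_set p x _ y hx0 hx1 hy, if_neg hyx]
        exact hres

theorem pvHalf_expand (p : List Int) (x : Int) (hR : pvRange p) (hx0 : 0 ≤ x) (hx1 : x < (p.length : Int)) :
    ∀ k y, 0 ≤ y → ∃ m, k ≤ m ∧ pvIt (p.set x.toNat (pvApp p (pvApp p x))) k y = pvIt p m y := by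
  intro k
  induction k with
  | zero => exact fun y _ => ⟨0, le_refl 0, rfl⟩
  | succ k ih =>
    intro y hy
    by_cases hyx : y = x
    · subst hyx
      obtain ⟨m, hm, hres⟩ := ih (pvApp p (pvApp p y)) (pvApp_nonneg p hR _ (pvApp_nonneg p hR y hy))
      refine ⟨m + 2, by omega, ?_⟩
      rw [pvIt_succ_left, pvApp_set p y _ y hx0 hx1 hy, if_pos rfl, hres,
        ← pvIt_succ_left, ← pvIt_succ_left]
    · obtain ⟨m, hm, hres⟩ := ih (pvApp p y) (pvApp_nonneg p hR y hy)
      refine ⟨m + 1, by omega, ?_⟩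
      rw [pvIt_succ_left, pvApp_set p x _ y hx0 hx1 hy, if_neg hyx, hres, ← pvIt_succ_left]

theorem pvHalf_acyc (p : List Int) (x : Int) (hR : pvRange p) (hA : pvAcyc p)
    (hx0 : 0 ≤ x) (hx1 : x < (p.length : Int)) :
    pvAcyc (p.set x.toNat (pvApp p (pvApp p x))) := by
  intro y hy0 hy1 k hk hcyc
  rw [List.length_set] at hy1
  obtain ⟨m, hm, hexp⟩ := pvHalf_expand p x hR hx0 hx1 k y hy0
  rw [hexp] at hcyc
  have hfy : pvApp p y = y := hA y hy0 hy1 m (by omega) hcyc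
  rw [pvApp_set p x _ y hx0 hx1 hy0]
  by_cases hyx : y = x
  · subst hyx
    rw [if_pos rfl, hfy, hfy]
  · rw [if_neg hyx]
    exact hfy

theorem pvHalf_range (p : List Int) (x : Int) (hR : pvRange p)
    (hx0 : 0 ≤ x) (hx1 : x < (p.length : Int)) :
    pvRange (p.set x.toNat (pvApp p (pvApp p x))) := by
  intro y hy0 hy1
  rw [List.length_set] at hy1 ⊢
  rw [pvApp_set p x _ y hx0 hx1 hy0]
  by_cases hyx : y = x
  · rw [if_pos hyx]
    exact hR _ (pvApp_nonneg p hR x hx0) (hR x hx0 hx1).2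
  · rw [if_neg hyx]
    exact hR y hy0 hy1

theorem pvHalf_root (p : List Int) (x : Int) (hR : pvRange p) (hx0 : 0 ≤ x) (hx1 : x < (p.length : Int))
    (y r : Int) (hy : 0 ≤ y) (h : pvRoot p y r) (hr0 : 0 ≤ r) :
    pvRoot (p.set x.toNat (pvApp p (pvApp p x))) y r := by
  obtain ⟨⟨k, hk⟩, hfix⟩ := h
  obtain ⟨m, _, hres⟩ := pvHalf_path p x hR hx0 hx1 k y r hy hk hfix
  exact ⟨⟨m, hres⟩, pvHalf_fix p x hx0 hx1 r hr0 hfix⟩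

-- the union step q' = q.set rb a (a, b distinct roots) ---------------------------------
theorem pvUnion_acyc (q : List Int) (a b : Int) (hR : pvRange q) (hA : pvAcyc q)
    (ha0 : 0 ≤ a) (ha1 : a < (q.length : Int)) (hb0 : 0 ≤ b) (hb1 : b < (q.length : Int))
    (hfa : pvApp q a = a) (hfb : pvApp q b = b) (hne : a ≠ b) :
    pvAcyc (q.set b.toNat a) := by
  have hfix' : pvApp (q.set b.toNat a) a = a := by
    rw [pvApp_set q b a a hb0 hb1 ha0, if_neg hne]
    exact hfa
  -- every iterate in q' either matches q's or has already collapsed to a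
  have hU1 : ∀ (m : Nat) (y : Int), 0 ≤ y →
      pvIt (q.set b.toNat a) m y = pvIt q m y ∨ pvIt (q.set b.toNat a) m y = a := by
    intro m
    induction m with
    | zero => exact fun y _ => Or.inl rfl
    | succ m ih =>
      intro y hy
      rcases ih y hy with h | h
      · rw [pvIt, h]
        by_cases hzb : pvIt q m y = b
        · rw [hzb, pvApp_set q b a b hb0 hb1 hb0, if_pos rfl]
          exact Or.inr rfl
        · by_cases hz0 : 0 ≤ pvIt q m y
          · rw [pvApp_set q b a _ hb0 hb1 hz0, if_neg hzb]
            exact Or.inl rfl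
          · exact absurd (pvIt_nonneg q hR y hy m) hz0
      · rw [pvIt, h, hfix']
        exact Or.inr rfl
  intro y hy0 hy1 k hk hcyc
  rw [List.length_set] at hy1
  rcases hU1 k y hy0 with h | h
  · rw [h] at hcyc
    have hfy : pvApp q y = y := hA y hy0 hy1 k hk hcyc
    by_cases hyb : y = b
    · exfalso
      match k, hk with
      | m + 1, _ =>
        have h2 : pvIt (q.set b.toNat a) (m + 1) y = a := by
          rw [pvIt_succ_left, hyb, pvApp_set q b a b hb0 hb1 hb0, if_pos rfl]
          exact pvIt_fix _ a hfix' m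
        rw [h, hcyc, hyb] at h2
        exact hne h2.symm
    · rw [pvApp_set q b a y hb0 hb1 hy0, if_neg hyb]
      exact hfy
  · rw [h] at hcyc
    subst hcyc
    exact hfix'

theorem pvUnion_root (q : List Int) (a b : Int) (hR : pvRange q)
    (ha0 : 0 ≤ a) (ha1 : a < (q.length : Int)) (hb0 : 0 ≤ b) (hb1 : b < (q.length : Int))
    (hfa : pvApp q a = a) (hfb : pvApp q b = b) (hne : a ≠ b)
    (y r : Int) (hy : 0 ≤ y) (h : pvRoot q y r) (hr0 : 0 ≤ r) :
    pvRoot (q.set b.toNat a) y (if r = b then a else r) := by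
  have hfix' : pvApp (q.set b.toNat a) a = a := by
    rw [pvApp_set q b a a hb0 hb1 ha0, if_neg hne]
    exact hfa
  obtain ⟨⟨k, hk⟩, hfixr⟩ := h
  by_cases hrb : r = b
  · rw [if_pos hrb]
    rw [hrb] at hk
    -- path y → b in q becomes y → b → a in q'
    have hH : ∀ (k : Nat) (y : Int), 0 ≤ y → pvIt q k y = b →
        pvIt (q.set b.toNat a) (k + 1) y = a := by
      intro k
      induction k with
      | zero =>
        intro y _ hit
        simp only [pvIt] at hit ⊢
        rw [hit, pvApp_set q b a b hb0 hb1 hb0, if_pos rfl]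
      | succ k ih =>
        intro y hy hit
        by_cases hyb : y = b
        · rw [pvIt_succ_left, hyb, pvApp_set q b a b hb0 hb1 hb0, if_pos rfl]
          exact pvIt_fix _ a hfix' (k + 1)
        · rw [pvIt_succ_left] at hit
          have := ih (pvApp q y) (pvApp_nonneg q hR y hy) hit
          rw [pvIt_succ_left, pvApp_set q b a y hb0 hb1 hy, if_neg hyb]
          exact this
    exact ⟨⟨k + 1, hH k y hy hk⟩, hfix'⟩
  · rw [if_neg hrb]
    have hG : ∀ (k : Nat) (y : Int), 0 ≤ y → pvIt q k y = r →
        pvIt (q.set b.toNat a) k y = r := by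
      intro k
      induction k with
      | zero => exact fun y _ hit => hit
      | succ k ih =>
        intro y hy hit
        by_cases hyb : y = b
        · exfalso
          rw [hyb, pvIt_fix q b hfb] at hit
          exact hrb hit.symm
        · rw [pvIt_succ_left] at hit
          have := ih (pvApp q y) (pvApp_nonneg q hR y hy) hit
          rw [pvIt_succ_left, pvApp_set q b a y hb0 hb1 hy, if_neg hyb]
          exact this
    refine ⟨⟨k, hG k y hy hk⟩, ?_⟩
    rw [pvApp_set q b a r hb0 hb1 hr0, if_neg hrb]
    exact hfixr

-- find --------------------------------------------------------------------------------
theorem pvGet_nonneg (xs : List Int) (i : Int) (h0 : 0 ≤ i) (h1 : i < (xs.length : Int)) :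
    PySem.List.pyGet? xs i = some (pvApp xs i) := by
  unfold pvApp
  simp [PySem.List.pyGet?, PySem.List.pyIdx?, h0, h1, List.getD_eq_getElem?_getD]

theorem pvGet_neg (xs : List Int) (i : Int) (h0 : -(xs.length : Int) ≤ i) (h1 : i < 0) :
    PySem.List.pyGet? xs i = some (pvApp xs (i + xs.length)) := by
  unfold pvApp
  have h2 : xs.length - (-i).toNat < xs.length := by omega
  have h3 : xs.length - (-i).toNat = (i + xs.length).toNat := by omega
  simp [PySem.List.pyGet?, PySem.List.pyIdx?, not_le.mpr h1, h0, h3,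
    List.getElem?_eq_getElem (h3 ▸ h2), List.getD_eq_getElem?_getD]

theorem pvFindAux_spec : ∀ (f : Nat) (p : List Int) (x r : Int) (k : Nat),
    pvRange p → pvAcyc p → 0 ≤ x → x < (p.length : Int) →
    pvIt p k x = r → pvApp p r = r → k < f →
    (findAux p x f).2 = r ∧ (findAux p x f).1.length = p.length ∧
    pvRange (findAux p x f).1 ∧ pvAcyc (findAux p x f).1 ∧
    (∀ y r', 0 ≤ y → 0 ≤ r' → pvRoot p y r' → pvRoot (findAux p x f).1 y r') := by
  intro f
  induction f with
  | zero => intro p x r k _ _ _ _ _ _ hkf; omega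
  | succ f ih =>
    intro p x r k hR hA hx0 hx1 hit hfix hkf
    have hget : PySem.List.pyGet? p x = some (pvApp p x) := pvGet_nonneg p x hx0 hx1
    by_cases hpx : pvApp p x = x
    · have heq : findAux p x (f + 1) = (p, x) := by
        simp only [findAux, hget, if_pos hpx]
      have hrx : r = x := by
        rw [pvIt_fix p x hpx k] at hit
        exact hit.symm
      rw [heq, hrx]
      exact ⟨rfl, rfl, hR, hA, fun y r' _ _ h => h⟩
    · have hx1' : pvApp p x < (p.length : Int) := (hR x hx0 hx1).2
      have hx0' : 0 ≤ pvApp p x := (hR x hx0 hx1).1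
      have hget2 : PySem.List.pyGet? p (pvApp p x) = some (pvApp p (pvApp p x)) :=
        pvGet_nonneg p _ hx0' hx1'
      have hset : pySetAt p x (pvApp p (pvApp p x)) = p.set x.toNat (pvApp p (pvApp p x)) := by
        unfold pySetAt
        rw [if_pos hx0]
      have heq : findAux p x (f + 1) =
          findAux (p.set x.toNat (pvApp p (pvApp p x))) (pvApp p (pvApp p x)) f := by
        simp only [findAux, hget, hget2, if_neg hpx, hset]
      obtain ⟨k0, rfl⟩ : ∃ k0, k = k0 + 1 := by
        rcases k with _ | k0
        · exact absurd (hfix.symm.trans (congrArg (pvApp p) hit.symm) ▸ hfix) (by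
            simp only [pvIt] at hit
            rw [← hit] at hfix
            exact absurd (hit ▸ hfix) hpx)
        · exact ⟨k0, rfl⟩
      have hr0 : 0 ≤ r := hit ▸ (pvIt_range p hR x hx0 hx1 (k0 + 1)).1
      have hfix' : pvApp (p.set x.toNat (pvApp p (pvApp p x))) r = r :=
        pvHalf_fix p x hx0 hx1 r hr0 hfix
      obtain ⟨m, hmf, hit'⟩ : ∃ m, m < f ∧
          pvIt (p.set x.toNat (pvApp p (pvApp p x))) m (pvApp p (pvApp p x)) = r := by
        rcases k0 with _ | k1
        · -- one step: r = p[x], a fixpoint, so p[p[x]] = r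
          refine ⟨0, by omega, ?_⟩
          simp only [pvIt] at hit ⊢
          rw [hit, hfix]
        · have hit2 : pvIt p k1 (pvApp p (pvApp p x)) = r := by
            rw [pvIt_succ_left, pvIt_succ_left] at hit
            exact hit
          obtain ⟨m, hm, hres⟩ := pvHalf_path p x hR hx0 hx1 k1 _ r
            (pvApp_nonneg p hR _ (pvApp_nonneg p hR x hx0)) hit2 hfix
          exact ⟨m, by omega, hres⟩
      have hR' := pvHalf_range p x hR hx0 hx1
      have hA' := pvHalf_acyc p x hR hA hx0 hx1
      have hlen' : (p.set x.toNat (pvApp p (pvApp p x))).length = p.length := List.length_set ..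
      have IH := ih (p.set x.toNat (pvApp p (pvApp p x))) (pvApp p (pvApp p x)) r m
        hR' hA' (pvApp_nonneg p hR _ (pvApp_nonneg p hR x hx0)) (by rw [hlen']; exact (hR _ hx0' hx1').2)
        hit' hfix' hmf
      rw [heq]
      refine ⟨IH.1, IH.2.1.trans hlen', IH.2.2.1, IH.2.2.2.1, ?_⟩
      intro y r' hy hr' hroot
      exact IH.2.2.2.2 y r' hy hr' (pvHalf_root p x hR hx0 hx1 y r' hy hroot hr')

theorem pvFindA_spec (p : List Int) (x r : Int)
    (hR : pvRange p) (hA : pvAcyc p) (hx0 : 0 ≤ x) (hx1 : x < (p.length : Int))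
    (hroot : pvRoot p x r) :
    (findA p x).2 = r ∧ (findA p x).1.length = p.length ∧
    pvRange (findA p x).1 ∧ pvAcyc (findA p x).1 ∧
    (∀ y r', 0 ≤ y → 0 ≤ r' → pvRoot p y r' → pvRoot (findA p x).1 y r') := by
  obtain ⟨r0, k0, hk0, hit0, hfix0⟩ := pvExists_reach p hR hA x hx0 hx1
  have hr : r = r0 := pvRoot_unique p x r r0 hroot ⟨⟨k0, hit0⟩, hfix0⟩
  subst hr
  exact pvFindAux_spec (p.length + 1) p x r k0 hR hA hx0 hx1 hit0 hfix0 (by omega)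

theorem pvFindA_neg (p : List Int) (u : Int) (hR : pvRange p)
    (h0 : -(p.length : Int) ≤ u) (h1 : u < 0) :
    findA p u = findA p (u + (p.length : Int)) := by
  have hlen : 1 ≤ p.length := by omega
  have hu0 : 0 ≤ u + (p.length : Int) := by omega
  have hu1 : u + (p.length : Int) < (p.length : Int) := by omega
  have hget : PySem.List.pyGet? p u = some (pvApp p (u + p.length)) := pvGet_neg p u h0 h1
  have hget' : PySem.List.pyGet? p (u + (p.length : Int)) = some (pvApp p (u + p.length)) :=
    pvGet_nonneg p _ hu0 hu1
  have hc0 : 0 ≤ pvApp p (u + (p.length : Int)) := (hR _ hu0 hu1).1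
  have hc1 : pvApp p (u + (p.length : Int)) < (p.length : Int) := (hR _ hu0 hu1).2
  have hcu : pvApp p (u + (p.length : Int)) ≠ u := by omega
  have hgetc : PySem.List.pyGet? p (pvApp p (u + (p.length : Int))) =
      some (pvApp p (pvApp p (u + (p.length : Int)))) := pvGet_nonneg p _ hc0 hc1
  unfold findA
  by_cases hc : pvApp p (u + (p.length : Int)) = u + (p.length : Int)
  · -- u's cell already holds a root: the write below is a no-op and both sides stop at it
    have happ : pvApp p (pvApp p (u + (p.length : Int))) = pvApp p (u + (p.length : Int)) := by
      rw [hc]; exact hc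
    have hidx : (u + (p.length : Int)).toNat < p.length := by omega
    have hcell : p[(u + (p.length : Int)).toNat] = pvApp p (u + (p.length : Int)) := by
      unfold pvApp
      rw [List.getD_eq_getElem?_getD, List.getElem?_eq_getElem hidx]
      rfl
    have hsetid : pySetAt p u (pvApp p (pvApp p (u + (p.length : Int)))) = p := by
      unfold pySetAt
      rw [if_neg (by omega : ¬ (0:Int) ≤ u), happ, ← hcell]
      exact List.set_getElem_self hidx
    have hstop : ∀ g, 1 ≤ g → findAux p (u + (p.length : Int)) g = (p, u + (p.length : Int)) := by
      intro g hg
      match g, hg with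
      | g + 1, _ => simp only [findAux, hget', if_pos hc]
    have hLHS : findAux p u (p.length + 1) = findAux p (u + (p.length : Int)) p.length := by
      simp only [findAux, hget, if_neg hcu, hgetc, hsetid]
      rw [happ, hc]
    rw [hLHS, hstop p.length hlen, hstop (p.length + 1) (by omega)]
  · -- both sides write the same cell and continue from the same node with the same fuel
    have hsets : pySetAt p u (pvApp p (pvApp p (u + (p.length : Int)))) =
        pySetAt p (u + (p.length : Int)) (pvApp p (pvApp p (u + (p.length : Int)))) := by
      unfold pySetAt
      rw [if_neg (by omega), if_pos hu0]
    simp only [findAux, hget, hget', if_neg (by omega : ¬ pvApp p (u + (p.length : Int)) = u),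
      if_neg hc, hgetc, hsets]

theorem pvRoot_bounds (p : List Int) (hR : pvRange p) (x r : Int)
    (hx0 : 0 ≤ x) (hx1 : x < (p.length : Int)) (h : pvRoot p x r) :
    0 ≤ r ∧ r < (p.length : Int) := by
  obtain ⟨⟨k, hk⟩, _⟩ := h
  exact hk ▸ pvIt_range p hR x hx0 hx1 k

-- the edge phase ----------------------------------------------------------------------
def pvRootsMatch (p comp : List Int) : Prop :=
  ∀ x : Int, 0 ≤ x → x < (comp.length : Int) → pvRoot p x (comp.getD x.toNat 0)

def pvEdgeInv (p comp : List Int) : Prop :=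
  p.length = comp.length ∧ pvRange p ∧ pvAcyc p ∧ pvRootsMatch p comp

theorem pvEdge_step (p comp : List Int) (u v : Int) (hI : pvEdgeInv p comp)
    (hu0 : -(comp.length : Int) ≤ u) (hu1 : u < (comp.length : Int))
    (hv0 : -(comp.length : Int) ≤ v) (hv1 : v < (comp.length : Int)) :
    pvEdgeInv (unionA p u v)
      (match PySem.List.pyGet? comp u, PySem.List.pyGet? comp v with
       | some a, some b => if a ≠ b then comp.map (fun c => if c = b then a else c) else comp
       | _, _ => comp) := by
  obtain ⟨hlen, hR, hA, hRM⟩ := hI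
  have hN : (p.length : Int) = (comp.length : Int) := by rw [hlen]
  -- normalised endpoints
  set u2 : Int := if u < 0 then u + (comp.length : Int) else u with hu2def
  set v2 : Int := if v < 0 then v + (comp.length : Int) else v with hv2def
  have hu20 : 0 ≤ u2 := by rw [hu2def]; split <;> omega
  have hu21 : u2 < (comp.length : Int) := by rw [hu2def]; split <;> omega
  have hv20 : 0 ≤ v2 := by rw [hv2def]; split <;> omega
  have hv21 : v2 < (comp.length : Int) := by rw [hv2def]; split <;> omega
  have hgetu : PySem.List.pyGet? comp u = some (pvApp comp u2) := by
    rw [hu2def]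
    by_cases h : u < 0
    · rw [if_pos h]; exact pvGet_neg comp u (by omega) h
    · rw [if_neg h]; exact pvGet_nonneg comp u (by omega) (by omega)
  have hgetv : PySem.List.pyGet? comp v = some (pvApp comp v2) := by
    rw [hv2def]
    by_cases h : v < 0
    · rw [if_pos h]; exact pvGet_neg comp v (by omega) h
    · rw [if_neg h]; exact pvGet_nonneg comp v (by omega) (by omega)
  -- the roots held in comp
  set a : Int := pvApp comp u2 with hadef
  set b : Int := pvApp comp v2 with hbdef
  have hroota : pvRoot p u2 a := hRM u2 hu20 hu21
  have hrootb : pvRoot p v2 b := hRM v2 hv20 hv21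
  have hab0 : 0 ≤ a ∧ a < (p.length : Int) := pvRoot_bounds p hR u2 a hu20 (by omega) hroota
  have hbb0 : 0 ≤ b ∧ b < (p.length : Int) := pvRoot_bounds p hR v2 b hv20 (by omega) hrootb
  -- first find
  have hfindu : findA p u = findA p u2 := by
    rw [hu2def]
    by_cases h : u < 0
    · rw [if_pos h, ← hN]; exact pvFindA_neg p u hR (by omega) h
    · rw [if_neg h]
  obtain ⟨hr1, hlen1, hR1, hA1, hpres1⟩ :=
    pvFindA_spec p u2 a hR hA hu20 (by omega) hroota
  have hrootb1 : pvRoot (findA p u2).1 v2 b := hpres1 v2 b hv20 hbb0.1 hrootb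
  -- second find
  have hfindv : findA (findA p u2).1 v = findA (findA p u2).1 v2 := by
    rw [hv2def]
    by_cases h : v < 0
    · rw [if_pos h, show ((comp.length : Int)) = ((findA p u2).1.length : Int) by rw [hlen1, hlen]]
      exact pvFindA_neg _ v hR1 (by rw [hlen1]; omega) h
    · rw [if_neg h]
  obtain ⟨hr2, hlen2, hR2, hA2, hpres2⟩ :=
    pvFindA_spec (findA p u2).1 v2 b hR1 hA1 hv20 (by rw [hlen1]; omega) hrootb1
  have hunion : unionA p u v =
      if a ≠ b then pySetAt (findA (findA p u2).1 v2).1 b a else (findA (findA p u2).1 v2).1 := by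
    unfold unionA
    simp only [hfindu, hfindv, hr1, hr2]
  rw [hgetu, hgetv, hunion]
  show pvEdgeInv _ (if a ≠ b then comp.map (fun c => if c = b then a else c) else comp)
  by_cases hab : a = b
  · rw [if_neg (not_not_intro hab), if_neg (not_not_intro hab)]
    refine ⟨by rw [hlen2, hlen1, hlen], hR2, hA2, ?_⟩
    intro x hx0 hx1
    have hbx := pvRoot_bounds p hR x (pvApp comp x) hx0 (by omega) (hRM x hx0 hx1)
    exact hpres2 x _ hx0 hbx.1 (hpres1 x _ hx0 hbx.1 (hRM x hx0 hx1))
  · rw [if_pos hab, if_pos hab]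
    have hfa2 : pvApp (findA (findA p u2).1 v2).1 a = a :=
      (hpres2 u2 a hu20 hab0.1 (hpres1 u2 a hu20 hab0.1 hroota)).2
    have hfb2 : pvApp (findA (findA p u2).1 v2).1 b = b :=
      (hpres2 v2 b hv20 hbb0.1 (hpres1 v2 b hv20 hbb0.1 hrootb)).2
    have hsetb : pySetAt (findA (findA p u2).1 v2).1 b a =
        (findA (findA p u2).1 v2).1.set b.toNat a := by
      unfold pySetAt
      rw [if_pos hbb0.1]
    have hlen22 : ((findA (findA p u2).1 v2).1.length : Int) = (p.length : Int) := by
      rw [hlen2, hlen1]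
    rw [hsetb]
    have ha1' : a < ((findA (findA p u2).1 v2).1.length : Int) := by omega
    have hb1' : b < ((findA (findA p u2).1 v2).1.length : Int) := by omega
    refine ⟨?_, ?_, ?_, ?_⟩
    · rw [List.length_set, hlen2, hlen1, hlen, List.length_map]
    · -- Range of the merged forest
      intro y hy0 hy1
      rw [List.length_set] at hy1 ⊢
      rw [pvApp_set _ b a y hbb0.1 hb1' hy0]
      by_cases hyb : y = b
      · rw [if_pos hyb]; omega
      · rw [if_neg hyb]; exact hR2 y hy0 hy1
    · exact pvUnion_acyc _ a b hR2 hA2 hab0.1 ha1' hbb0.1 hb1' hfa2 hfb2 hab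
    · -- RootsMatch against the relabelled comp
      intro x hx0 hx1
      rw [List.length_map] at hx1
      have hcomp' : (comp.map (fun c => if c = b then a else c)).getD x.toNat 0 =
          if pvApp comp x = b then a else pvApp comp x := by
        have hidx : x.toNat < comp.length := by omega
        show (comp.map fun c => if c = b then a else c).getD x.toNat 0 = _
        rw [List.getD_eq_getElem?_getD, List.getElem?_map, List.getElem?_eq_getElem hidx]
        show (if comp[x.toNat] = b then a else comp[x.toNat]) = _
        have : pvApp comp x = comp[x.toNat] := by
          unfold pvApp
          rw [List.getD_eq_getElem?_getD, List.getElem?_eq_getElem hidx]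
          rfl
        rw [this]
      rw [hcomp']
      have hbx := pvRoot_bounds p hR x (pvApp comp x) hx0 (by omega) (hRM x hx0 hx1)
      have hroot2 : pvRoot (findA (findA p u2).1 v2).1 x (pvApp comp x) :=
        hpres2 x _ hx0 hbx.1 (hpres1 x _ hx0 hbx.1 (hRM x hx0 hx1))
      exact pvUnion_root _ a b hR2 hab0.1 ha1' hbb0.1 hb1' hfa2 hfb2 hab x _ hx0 hroot2 hbx.1

theorem pvEdge_fold (es : List (Int × Int × Int)) (threshold : Int) : ∀ (p comp : List Int),
    pvEdgeInv p comp →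
    (∀ e ∈ es, e.2.2 < threshold →
      (-(comp.length : Int) ≤ e.1 ∧ e.1 < (comp.length : Int) ∧
       -(comp.length : Int) ≤ e.2.1 ∧ e.2.1 < (comp.length : Int))) →
    pvEdgeInv
      (es.foldl (fun p e => if e.2.2 < threshold then unionA p e.1 e.2.1 else p) p)
      (es.foldl (fun comp e =>
        if e.2.2 < threshold then
          match PySem.List.pyGet? comp e.1, PySem.List.pyGet? comp e.2.1 with
          | some a, some b => if a ≠ b then comp.map (fun c => if c = b then a else c) else comp
          | _, _ => comp
        else comp) comp) ∧
    (es.foldl (fun comp e =>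
        if e.2.2 < threshold then
          match PySem.List.pyGet? comp e.1, PySem.List.pyGet? comp e.2.1 with
          | some a, some b => if a ≠ b then comp.map (fun c => if c = b then a else c) else comp
          | _, _ => comp
        else comp) comp).length = comp.length := by
  intro p comp
  induction es generalizing p comp with
  | nil => exact fun hI _ => ⟨hI, rfl⟩
  | cons e es ih =>
    intro hI hb
    simp only [List.foldl_cons]
    by_cases hw : e.2.2 < threshold
    · obtain ⟨h1, h2, h3, h4⟩ := hb e (List.mem_cons_self ..) hw
      have hstep := pvEdge_step p comp e.1 e.2.1 hI h1 h2 h3 h4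
      have hlencomp : (match PySem.List.pyGet? comp e.1, PySem.List.pyGet? comp e.2.1 with
          | some a, some b => if a ≠ b then comp.map (fun c => if c = b then a else c) else comp
          | _, _ => comp).length = comp.length := by
        rcases PySem.List.pyGet? comp e.1 with _ | a <;> rcases PySem.List.pyGet? comp e.2.1 with _ | b <;>
          simp only []
        split <;> simp
      rw [if_pos hw, if_pos hw]
      have := ih _ _ hstep (by
        intro e' he' hw'
        rw [hlencomp]
        exact hb e' (List.mem_cons_of_mem _ he') hw')
      rw [hlencomp] at this
      exact this
    · rw [if_neg hw, if_neg hw]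
      exact ih p comp hI (fun e' he' hw' => hb e' (List.mem_cons_of_mem _ he') hw')

-- the grouping phase ------------------------------------------------------------------
def pvCouple (d : PySem.Dict Int (List Int)) (cl : List (List Int)) (io : PySem.Dict Int Int) : Prop :=
  (d.items.map Prod.fst).Nodup ∧ cl = d.items.map Prod.snd ∧
  ∀ r : Int, io.get? r = (PySem.List.index? (d.items.map Prod.fst) r).map (fun n => (n : Int))

theorem pvMapNoKey (r : Int) (w : List Int) : ∀ (L : List (Int × List Int)),
    r ∉ L.map Prod.fst → L.map (fun p => if p.1 == r then (r, w) else p) = L := by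
  intro L
  induction L with
  | nil => intro _; rfl
  | cons hd t ih =>
    intro hmem
    simp only [List.map_cons, List.mem_cons] at hmem
    push Not at hmem
    rw [List.map_cons, if_neg (by simp [hmem.1.symm]), ih hmem.2]

theorem pvReplace (w : List Int) : ∀ (L : List (Int × List Int)) (r : Int) (j : Nat),
    PySem.List.index? (L.map Prod.fst) r = some j → (L.map Prod.fst).Nodup →
    List.find? (fun p => p.1 == r) L = some (r, (L.map Prod.snd).getD j []) ∧
    L.map (fun p => if p.1 == r then (r, w) else p) = L.set j (r, w) ∧
    j < L.length ∧
    (L.set j (r, w)).map Prod.fst = L.map Prod.fst := by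
  intro L
  induction L with
  | nil => intro r j h _; rw [List.map_nil, (PySem.List.index?_eq_none_iff [] r).mpr (by simp)] at h; exact absurd h (by simp)
  | cons hd t ih =>
    intro r j hidx hnd
    rw [List.map_cons] at hidx hnd
    by_cases hk : hd.1 = r
    · rw [hk, PySem.List.index?_cons_self] at hidx
      obtain rfl : j = 0 := by injection hidx with h; exact h.symm
      have hmem : r ∉ t.map Prod.fst := by
        rw [← hk]
        exact (List.nodup_cons.mp (hk ▸ hnd)).1
      refine ⟨?_, ?_, by simp, ?_⟩
      · rw [List.find?_cons_of_pos (by simp [hk]), List.map_cons, List.getD_cons_zero]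
        have : hd = (r, hd.2) := by rw [← hk]
        rw [this]
      · rw [List.map_cons, if_pos (by simp [hk]), List.set_cons_zero, pvMapNoKey r w t hmem]
      · simp [hk]
    · rw [PySem.List.index?_cons_of_ne (t.map Prod.fst) hk] at hidx
      obtain ⟨j', hj', rfl⟩ : ∃ j', PySem.List.index? (t.map Prod.fst) r = some j' ∧ j = j' + 1 := by
        rcases h : PySem.List.index? (t.map Prod.fst) r with _ | j'
        · rw [h] at hidx; simp at hidx
        · rw [h] at hidx
          simp only [Option.map_some] at hidx
          exact ⟨j', rfl, by injection hidx with h2; exact h2.symm⟩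
      obtain ⟨ihf, ihm, ihl, ihs⟩ := ih r j' hj' (List.nodup_cons.mp hnd).2
      refine ⟨?_, ?_, by simp; omega, ?_⟩
      · rw [List.find?_cons_of_neg (by simp [hk]), ihf, List.map_cons, List.getD_cons_succ]
      · rw [List.map_cons, if_neg (by simp [hk]), List.set_cons_succ, ihm]
      · rw [List.set_cons_succ, List.map_cons, List.map_cons, ihs]

theorem pvCouple_step (d : PySem.Dict Int (List Int)) (cl : List (List Int)) (io : PySem.Dict Int Int)
    (r i : Int) (h : pvCouple d cl io) :
    pvCouple (d.modify r [] (fun l => l ++ [i]))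
      (match io.get? r with
       | some j => cl.modify j.toNat (fun l => l ++ [i])
       | none => cl ++ [[i]])
      (match io.get? r with
       | some _ => io
       | none => io.insert r (cl.length : Int)) := by
  obtain ⟨hnd, hcl, hio⟩ := h
  rcases hidx : PySem.List.index? (d.items.map Prod.fst) r with _ | j
  · -- new key: both sides append
    have hmem : r ∉ d.items.map Prod.fst := (PySem.List.index?_eq_none_iff _ r).mp hidx
    have hgior : io.get? r = none := by rw [hio r, hidx]; rfl
    rw [hgior]
    have hfind : List.find? (fun p => p.1 == r) d.items = none := by
      rw [List.find?_eq_none]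
      intro p hp
      simp only [beq_iff_eq]
      exact fun h => hmem (h ▸ List.mem_map_of_mem hp)
    have hcont : d.contains r = false := by
      unfold PySem.Dict.contains
      rw [List.any_eq_false]
      intro p hp
      simp only [beq_iff_eq]
      exact fun h => hmem (h ▸ List.mem_map_of_mem hp)
    have hgetD : d.getD r [] = [] := by
      unfold PySem.Dict.getD PySem.Dict.get?
      rw [hfind]
      rfl
    have hins : (d.modify r [] (fun l => l ++ [i])).items = d.items ++ [(r, [i])] := by
      unfold PySem.Dict.modify PySem.Dict.insert
      rw [hcont, hgetD]
      simp
    refine ⟨?_, ?_, ?_⟩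
    · rw [hins, List.map_append, List.map_cons, List.map_nil]
      refine List.Nodup.append hnd (by simp) ?_
      intro a ha hb
      simp only [List.mem_singleton] at hb
      exact hmem (hb ▸ ha)
    · rw [hins, List.map_append, List.map_cons, List.map_nil, hcl]
    · intro r'
      rw [hins, List.map_append, List.map_cons, List.map_nil, PySem.Dict.get?_insert]
      by_cases hr' : r' = r
      · rw [if_pos hr', hr',
          PySem.List.index?_append_singleton_self _ r hmem]
        have hl : (d.items.map Prod.fst).length = cl.length := by
          rw [hcl, List.length_map, List.length_map]
        rw [hl]
        rfl
      · rw [if_neg hr', hio r']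
        by_cases hm : r' ∈ d.items.map Prod.fst
        · rw [PySem.List.index?_append_of_mem _ hm]
        · rw [(PySem.List.index?_eq_none_iff _ r').mpr hm,
            (PySem.List.index?_eq_none_iff _ r').mpr (by simp [hm, hr'])]
  · -- existing key: both sides update position j in place
    have hgior : io.get? r = some (j : Int) := by rw [hio r, hidx]; rfl
    rw [hgior]
    show pvCouple (d.modify r [] fun l => l ++ [i])
      (cl.modify ((j : Int)).toNat fun l => l ++ [i]) io
    obtain ⟨hfind, hmap, hjlen, hfst⟩ := pvReplace (d.getD r [] ++ [i]) d.items r j hidx hnd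
    have hcllen : cl.length = d.items.length := by rw [hcl, List.length_map]
    have hjcl : j < cl.length := by omega
    have hgetD : d.getD r [] = cl.getD j [] := by
      unfold PySem.Dict.getD PySem.Dict.get?
      rw [hfind, hcl]
      rfl
    have hcont : d.contains r = true := by
      unfold PySem.Dict.contains
      rw [List.any_eq_true]
      refine ⟨(r, (d.items.map Prod.snd).getD j []), List.mem_of_find?_eq_some hfind, by simp⟩
    have hins : (d.modify r [] (fun l => l ++ [i])).items =
        d.items.set j (r, d.getD r [] ++ [i]) := by
      unfold PySem.Dict.modify PySem.Dict.insert
      rw [hcont]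
      simp only [if_pos]
      exact hmap
    refine ⟨?_, ?_, ?_⟩
    · rw [hins, hfst]
      exact hnd
    · rw [hins, List.map_set, Int.toNat_natCast,
        List.modify_eq_set_get _ hjcl, ← hcl, hgetD]
      congr 1
      rw [List.getD_eq_getElem?_getD, List.getElem?_eq_getElem hjcl]
      rfl
    · intro r'
      rw [hins, hfst, hio r']

theorem pvGroup_loop (n : Int) : ∀ (k : Nat) (a : Int) (p comp : List Int)
    (d : PySem.Dict Int (List Int)) (cl : List (List Int)) (io : PySem.Dict Int Int),
    k = ((n - a) : Int).toNat → 0 ≤ a → comp.length = n.toNat → pvEdgeInv p comp → pvCouple d cl io →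
    pvCouple
      ((PySem.List.pyRange a n 1).foldl
        (fun (s : List Int × PySem.Dict Int (List Int)) i =>
          let fr := findA s.1 i
          (fr.1, s.2.modify fr.2 [] (fun l => l ++ [i]))) (p, d)).2
      ((PySem.List.enumerate (comp.drop a.toNat) a).foldl
        (fun (s : List (List Int) × PySem.Dict Int Int) ir =>
          match s.2.get? ir.2 with
          | some j => (s.1.modify j.toNat (fun l => l ++ [ir.1]), s.2)
          | none => (s.1 ++ [[ir.1]], s.2.insert ir.2 (s.1.length : Int))) (cl, io)).1
      ((PySem.List.enumerate (comp.drop a.toNat) a).foldl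
        (fun (s : List (List Int) × PySem.Dict Int Int) ir =>
          match s.2.get? ir.2 with
          | some j => (s.1.modify j.toNat (fun l => l ++ [ir.1]), s.2)
          | none => (s.1 ++ [[ir.1]], s.2.insert ir.2 (s.1.length : Int))) (cl, io)).2 := by
  intro k
  induction k using Nat.strong_induction_on with
  | _ k ih =>
    intro a p comp d cl io hk ha0 hclen hI hC
    by_cases han : a < n
    · have hk1 : 1 ≤ k := by omega
      have hidx : a.toNat < comp.length := by omega
      obtain ⟨hlen, hR, hA, hRM⟩ := hI
      have hgetD : comp.getD a.toNat 0 = comp[a.toNat] := by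
        rw [List.getD_eq_getElem?_getD, List.getElem?_eq_getElem hidx]
        rfl
      have hroot : pvRoot p a (comp[a.toNat]) := hgetD ▸ hRM a ha0 (by omega)
      obtain ⟨hfr2, hlen1, hR1, hA1, hpres1⟩ :=
        pvFindA_spec p a (comp[a.toNat]) hR hA ha0 (by omega) hroot
      have hI1 : pvEdgeInv (findA p a).1 comp := by
        refine ⟨by rw [hlen1, hlen], hR1, hA1, ?_⟩
        intro x hx0 hx1
        have hb := pvRoot_bounds p hR x _ hx0 (by omega) (hRM x hx0 hx1)
        exact hpres1 x _ hx0 hb.1 (hRM x hx0 hx1)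
      have hCs := pvCouple_step d cl io (comp[a.toNat]) a hC
      rw [PySem.List.pyRange_one_cons han, List.drop_eq_getElem_cons hidx,
        PySem.List.enumerate_cons]
      simp only [List.foldl_cons]
      have hsucc : a.toNat + 1 = (a + 1).toNat := by omega
      rw [hsucc, hfr2]
      rcases hg : io.get? (comp[a.toNat]) with _ | j
      · rw [hg] at hCs
        exact ih (k - 1) (by omega) (a + 1) (findA p a).1 comp _ _ _
          (by omega) (by omega) hclen hI1 hCs
      · rw [hg] at hCs
        exact ih (k - 1) (by omega) (a + 1) (findA p a).1 comp _ _ _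
          (by omega) (by omega) hclen hI1 hCs
    · have ha : PySem.List.pyRange a n 1 = [] := PySem.List.pyRange_one_eq_nil (by omega)
      have hd : comp.drop a.toNat = [] := List.drop_of_length_le (by omega)
      rw [ha, hd]
      exact hC

theorem pvFinal (d : PySem.Dict Int (List Int)) (cl : List (List Int)) (io : PySem.Dict Int Int)
    (h : pvCouple d cl io) :
    (d.values,
      ((PySem.List.enumerate d.values 0).foldl
        (fun (m : PySem.Dict Int Int) ci => ci.2.foldl (fun m s => m.insert s ci.1) m)
        PySem.Dict.empty).items)
    = (cl,
      ((PySem.List.enumerate cl 0).foldl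
        (fun (m : PySem.Dict Int Int) ci => ci.2.foldl (fun m s => m.insert s ci.1) m)
        PySem.Dict.empty).items) := by
  have hv : d.values = cl := h.2.1.symm
  rw [hv]

-- ===== VERDICT (by name: the statement is the Claim_ definition above) =====
theorem collapse_samples_py_spec : Claim_equal_collapse_samples_py := by
  intro es n th _ hpre
  unfold Spec_collapse_samples_py
  simp only [collapse_samples_py, collapse_samples_py_alt]
  have hlen0 : (PySem.List.pyRange 0 n 1).length = n.toNat := by
    rw [PySem.List.length_pyRange_one]
    simp
  have happ0 : ∀ x : Int, 0 ≤ x → x < ((PySem.List.pyRange 0 n 1).length : Int) →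
      pvApp (PySem.List.pyRange 0 n 1) x = x := by
    intro x hx0 hx1
    unfold pvApp
    have hidx : x.toNat < (PySem.List.pyRange 0 n 1).length := by omega
    rw [List.getD_eq_getElem?_getD, List.getElem?_eq_getElem hidx]
    show (PySem.List.pyRange 0 n 1)[x.toNat] = x
    rw [PySem.List.getElem_pyRange_one]
    omega
  have hI0 : pvEdgeInv (PySem.List.pyRange 0 n 1) (PySem.List.pyRange 0 n 1) := by
    refine ⟨rfl, ?_, ?_, ?_⟩
    · intro x hx0 hx1
      rw [happ0 x hx0 hx1]
      exact ⟨hx0, hx1⟩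
    · intro x hx0 hx1 k _ _
      exact happ0 x hx0 hx1
    · intro x hx0 hx1
      have : (PySem.List.pyRange 0 n 1).getD x.toNat 0 = x := happ0 x hx0 hx1
      rw [this]
      exact ⟨⟨0, rfl⟩, happ0 x hx0 hx1⟩
  have hbounds : ∀ e ∈ es, e.2.2 < th →
      (-((PySem.List.pyRange 0 n 1).length : Int) ≤ e.1 ∧
       e.1 < ((PySem.List.pyRange 0 n 1).length : Int) ∧
       -((PySem.List.pyRange 0 n 1).length : Int) ≤ e.2.1 ∧
       e.2.1 < ((PySem.List.pyRange 0 n 1).length : Int)) := by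
    intro e he hw
    have := hpre e he hw
    rw [hlen0]
    omega
  obtain ⟨hIF, hlenF⟩ := pvEdge_fold es th (PySem.List.pyRange 0 n 1) (PySem.List.pyRange 0 n 1) hI0 hbounds
  have hC0 : pvCouple PySem.Dict.empty [] PySem.Dict.empty := ⟨List.nodup_nil, rfl, fun r => rfl⟩
  have hgrp := pvGroup_loop n ((n - 0 : Int)).toNat 0
    (es.foldl (fun p e => if e.2.2 < th then unionA p e.1 e.2.1 else p) (PySem.List.pyRange 0 n 1))
    (es.foldl (fun comp e =>
        if e.2.2 < th then
          match PySem.List.pyGet? comp e.1, PySem.List.pyGet? comp e.2.1 with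
          | some a, some b => if a ≠ b then comp.map (fun c => if c = b then a else c) else comp
          | _, _ => comp
        else comp) (PySem.List.pyRange 0 n 1))
    PySem.Dict.empty [] PySem.Dict.empty rfl (le_refl 0) (by rw [hlenF, hlen0]) hIF hC0
  exact pvFinal _ _ _ hgrp
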